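-- pv_equiv track=rewrite | github.com/Kwakcena/codeplus-SW-competency | 재귀/123더하기/baekjoon_9095_test.py | solution
-- ===== SOURCE A (Python) =====
-- def solution(sum, goal):
--     if sum > goal:
--         return 0
--     if sum == goal:
--         return 1
--
--     ans = 0
--     for i in range(1, 4):
--         ans += solution(sum+i, goal)
--     return ans
-- ===== SOURCE B (Python) =====
-- def solution(sum, goal):
--     if sum > goal:
--         return 0
--     a = b = 0
--     c = 1
--     for _ in range(goal - sum):
--         a, b, c = b, c, a + b + c
--     return c
-- ===== Notes on version B (the rewrite author's own statement) =====
-- stated objective: faster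
-- what changed: Replaced the exponential 3-way recursion with a single linear tribonacci loop over n = goal - sum keeping the last three counts.
import Mathlib
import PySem

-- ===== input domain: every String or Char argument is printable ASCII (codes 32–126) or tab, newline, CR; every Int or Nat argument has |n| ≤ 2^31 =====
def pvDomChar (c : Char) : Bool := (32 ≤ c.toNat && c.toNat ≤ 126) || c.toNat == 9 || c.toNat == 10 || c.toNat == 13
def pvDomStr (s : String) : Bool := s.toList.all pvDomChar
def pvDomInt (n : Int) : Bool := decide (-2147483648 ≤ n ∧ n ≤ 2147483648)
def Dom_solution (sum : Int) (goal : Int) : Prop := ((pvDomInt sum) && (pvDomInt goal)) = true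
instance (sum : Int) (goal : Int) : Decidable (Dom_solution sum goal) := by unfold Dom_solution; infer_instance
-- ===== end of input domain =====

-- B replaces A's exponential 3-way recursion by a linear tribonacci loop (objective: faster, asymptotic).

-- ===== PORT A =====
-- A's loop 'for i in range(1, 4): ans += solution(sum+i, goal)' is transliterated
-- with its three iterations written out (the same three recursive calls, in order).
def solution (sum : Int) (goal : Int) : Int :=
  if sum > goal then 0
  else if sum = goal then 1
  else
    solution (sum + 1) goal + solution (sum + 2) goal + solution (sum + 3) goal
termination_by (goal - sum).toNat
decreasing_by all_goals (simp at *; omega)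

-- ===== PORT B =====
-- 'for _ in range(goal - sum): a, b, c = b, c, a+b+c' over state (a, b, c) = (0, 0, 1);
-- range(m) for m ≥ 0 (guaranteed by the guard) is 0..m-1, ported as List.range m.toNat.
def solution_alt (sum : Int) (goal : Int) : Int :=
  if sum > goal then 0
  else
    ((List.range (goal - sum).toNat).foldl
      (fun (st : Int × Int × Int) _ => (st.2.1, st.2.2, st.1 + st.2.1 + st.2.2))
      (0, 0, 1)).2.2

-- ===== PRECONDITION & SPEC =====
-- Pre_ excludes goal - sum >= 998, on which Python A raises RecursionError
-- (CPython's default recursion limit) instead of returning a value.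
def Pre_solution (sum : Int) (goal : Int) : Prop := goal - sum < 998
instance (sum : Int) (goal : Int) : Decidable (Pre_solution sum goal) := by unfold Pre_solution; infer_instance
def pvWitness_solution : Int × Int := (3, 7)

def Spec_solution (sum : Int) (goal : Int) (out : Int) : Prop := out = solution_alt sum goal
instance (sum : Int) (goal : Int) (out : Int) : Decidable (Spec_solution sum goal out) := by unfold Spec_solution; infer_instance

-- ===== CLAIM (what is proved, stated in full; the proofs are below) =====
def Claim_equal_solution : Prop := ∀ (sum : Int) (goal : Int), Dom_solution sum goal → Pre_solution sum goal → Spec_solution sum goal (solution sum goal)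

-- ===== LEMMAS AND PROOFS =====

-- number of compositions of n into parts 1, 2, 3 (tribonacci)
def trib : Nat → Int
  | 0 => 1
  | 1 => 1
  | 2 => 2
  | (n + 3) => trib (n + 2) + trib (n + 1) + trib n

-- A computes trib
theorem solution_eq_trib : ∀ (n : Nat) (sum goal : Int), sum + n = goal → solution sum goal = trib n := by
  intro n
  induction n using Nat.strong_induction_on with
  | _ n ih =>
    intro sum goal h
    rw [solution]
    match n with
    | 0 =>
      rw [if_neg (by omega), if_pos (by omega)]; rfl
    | 1 =>
      rw [if_neg (by omega), if_neg (by omega)]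
      rw [ih 0 (by omega) (sum + 1) goal (by omega)]
      rw [show solution (sum + 2) goal = 0 by rw [solution]; rw [if_pos (by omega)]]
      rw [show solution (sum + 3) goal = 0 by rw [solution]; rw [if_pos (by omega)]]
      rfl
    | 2 =>
      rw [if_neg (by omega), if_neg (by omega)]
      rw [ih 1 (by omega) (sum + 1) goal (by omega)]
      rw [ih 0 (by omega) (sum + 2) goal (by omega)]
      rw [show solution (sum + 3) goal = 0 by rw [solution]; rw [if_pos (by omega)]]
      rfl
    | (m + 3) =>
      rw [if_neg (by omega), if_neg (by omega)]
      rw [ih (m + 2) (by omega) (sum + 1) goal (by omega)]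
      rw [ih (m + 1) (by omega) (sum + 2) goal (by omega)]
      rw [ih m (by omega) (sum + 3) goal (by omega)]
      rfl

def stepB (st : Int × Int × Int) : Int × Int × Int := (st.2.1, st.2.2, st.1 + st.2.1 + st.2.2)

def iterB : Nat → Int × Int × Int
  | 0 => (0, 0, 1)
  | (n + 1) => stepB (iterB n)

theorem foldl_range_iterB (n : Nat) :
    (List.range n).foldl (fun (st : Int × Int × Int) _ => (st.2.1, st.2.2, st.1 + st.2.1 + st.2.2)) (0, 0, 1) = iterB n := by
  induction n with
  | zero => rfl
  | succ n ih => rw [List.range_succ, List.foldl_append, ih]; rfl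

theorem iterB_trib : ∀ n : Nat, iterB (n + 2) = (trib n, trib (n + 1), trib (n + 2)) := by
  intro n
  induction n with
  | zero => rfl
  | succ n ih =>
    show stepB (iterB (n + 2)) = _
    rw [ih]
    show (trib (n + 1), trib (n + 2), trib n + trib (n + 1) + trib (n + 2)) = _
    rw [show trib (n + 3) = trib (n + 2) + trib (n + 1) + trib n from rfl]
    ring_nf

theorem iterB_snd (n : Nat) : (iterB n).2.2 = trib n := by
  match n with
  | 0 => rfl
  | 1 => rfl
  | (m + 2) => rw [iterB_trib]

theorem solution_alt_eq_trib (sum goal : Int) (h : sum ≤ goal) : solution_alt sum goal = trib (goal - sum).toNat := by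
  rw [solution_alt, if_neg (by omega), foldl_range_iterB, iterB_snd]

-- ===== VERDICT (by name: the statement is the Claim_ definition above) =====
theorem solution_spec : Claim_equal_solution := by
  intro sum goal _ _
  unfold Spec_solution
  by_cases h : sum > goal
  · rw [solution, solution_alt, if_pos h, if_pos h]
  · rw [solution_alt_eq_trib sum goal (by omega),
        solution_eq_trib (goal - sum).toNat sum goal (by omega)]
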